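-- pv_equiv track=rewrite | github.com/Lucas-C/dotfiles_and_notes | languages/python/battledev_regionsjobs_isograd_2018-03-27/challenge6.py | get_door_chains_in_paths
-- ===== SOURCE A (Python) =====
-- def get_door_chains_in_paths(pos, paths, m, visited=None):
--     'Return: set(tuple(doors))'
--     i, j = pos
--     if m[i][j] == 'c':
--         return {()}
--     visited = visited | {pos} if visited else {pos}  # this makes a copy of `visited`, so it is shared only by downstream calls
--     parent_door_chains = [get_door_chains_in_paths(parent_pos, paths, m, visited)
--                           for parent_pos in paths[pos]
--                           if parent_pos not in visited]
--     parent_door_chains = set.union(*parent_door_chains) if parent_door_chains else set()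
--     return {(pos,) + dp for dp in parent_door_chains} if m[i][j] == '?' else parent_door_chains
-- ===== SOURCE B (Python) =====
-- def get_door_chains_in_paths(pos, paths, m, visited=None):
--     'Return: set(tuple(doors))'
--     base = frozenset(visited) if visited else frozenset()
--     result = set()
--     stack = [(pos, base, ())]
--     while stack:
--         p, vis, chain = stack.pop()
--         i, j = p
--         cell = m[i][j]
--         if cell == 'c':
--             result.add(chain)
--             continue
--         chain2 = chain + (p,) if cell == '?' else chain
--         vis2 = vis | {p}
--         for parent in reversed(paths[p]):
--             if parent not in vis2:
--                 stack.append((parent, vis2, chain2))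
--     return result
-- ===== Notes on version B (the rewrite author's own statement) =====
-- stated objective: alternative
-- what changed: The recursive DFS that unions per-branch result sets and prepends the door on unwind is replaced by an explicit-stack iterative DFS that threads the accumulated door chain downward and adds each completed chain to one result set.
import Mathlib
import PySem

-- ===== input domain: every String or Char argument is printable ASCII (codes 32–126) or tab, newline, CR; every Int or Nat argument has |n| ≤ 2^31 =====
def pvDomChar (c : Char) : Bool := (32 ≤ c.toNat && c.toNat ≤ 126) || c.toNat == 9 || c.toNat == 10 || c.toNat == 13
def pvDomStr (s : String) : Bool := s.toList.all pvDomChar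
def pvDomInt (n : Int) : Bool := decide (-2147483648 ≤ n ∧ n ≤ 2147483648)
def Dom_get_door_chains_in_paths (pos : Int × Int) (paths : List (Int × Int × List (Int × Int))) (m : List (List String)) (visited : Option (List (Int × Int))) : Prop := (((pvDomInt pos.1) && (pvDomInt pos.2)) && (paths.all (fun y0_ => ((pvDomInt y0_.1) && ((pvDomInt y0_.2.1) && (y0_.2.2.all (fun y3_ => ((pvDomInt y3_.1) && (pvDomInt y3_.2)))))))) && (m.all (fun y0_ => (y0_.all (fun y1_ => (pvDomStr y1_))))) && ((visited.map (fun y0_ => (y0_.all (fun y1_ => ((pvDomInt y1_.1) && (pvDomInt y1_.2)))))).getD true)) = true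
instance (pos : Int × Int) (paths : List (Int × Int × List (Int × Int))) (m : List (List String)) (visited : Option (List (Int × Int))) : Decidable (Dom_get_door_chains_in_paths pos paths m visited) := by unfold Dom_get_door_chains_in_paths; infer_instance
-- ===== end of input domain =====

-- B replaces A's recursive DFS (per-branch set unions, door prepended on unwind) by an
-- explicit-stack iterative DFS that carries the partial chain downward into one result set;
-- same cost, different decomposition (objective: alternative).

-- ===== PORT A =====
-- m[i][j]: none = IndexError (excluded by Pre_); pvCell is the total form used under Pre_
def pvCellOpt (m : List (List String)) (p : Int × Int) : Option String :=
  (PySem.List.pyGet? m p.1).bind (fun row => PySem.List.pyGet? row p.2)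
def pvCell (m : List (List String)) (p : Int × Int) : String := (pvCellOpt m p).getD ""

-- termination machinery shared by both ports (positions not yet visited, counted in a Finset;
-- cited by the decreasing_by proofs only — it plays no role in the computed values)
def pvUnivF (pd : PySem.Dict (Int × Int) (List (Int × Int))) : Finset (Int × Int) :=
  pd.values.flatten.toFinset
def pvMuF (pd : PySem.Dict (Int × Int) (List (Int × Int))) (pos : Int × Int) (V : Finset (Int × Int)) : Nat :=
  2 * ((pvUnivF pd) \ V).card + (if pos ∈ pvUnivF pd ∧ pos ∉ V then 0 else 1)

theorem pvMu_lt (pd : PySem.Dict (Int × Int) (List (Int × Int))) (pos q : Int × Int) (V : Finset (Int × Int))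
    (hq : q ∈ pvUnivF pd) (hq2 : q ∉ insert pos V) :
    pvMuF pd q (insert pos V) < pvMuF pd pos V := by
  have hqV : q ∉ V := fun h => hq2 (Finset.mem_insert_of_mem h)
  unfold pvMuF
  by_cases hpv : pos ∈ V
  · rw [Finset.insert_eq_self.2 hpv]
    rw [if_pos ⟨hq, hqV⟩, if_neg (by intro h; exact h.2 hpv)]
    omega
  · by_cases hpu : pos ∈ pvUnivF pd
    · have hmem : pos ∈ pvUnivF pd \ V := Finset.mem_sdiff.2 ⟨hpu, hpv⟩
      have hcard : (pvUnivF pd \ insert pos V).card = (pvUnivF pd \ V).card - 1 := by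
        rw [Finset.sdiff_insert, Finset.card_erase_of_mem hmem]
      have hpos1 : 1 ≤ (pvUnivF pd \ V).card := Finset.card_pos.2 ⟨pos, hmem⟩
      have h1 : (if q ∈ pvUnivF pd ∧ q ∉ insert pos V then 0 else 1) ≤ 1 := by split <;> omega
      rw [if_pos (show pos ∈ pvUnivF pd ∧ pos ∉ V from ⟨hpu, hpv⟩), hcard]
      omega
    · have hsd : pvUnivF pd \ insert pos V = pvUnivF pd \ V := by
        rw [Finset.sdiff_insert, Finset.erase_eq_of_notMem (fun h => hpu (Finset.mem_sdiff.1 h).1)]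
      rw [hsd, if_pos ⟨hq, hq2⟩, if_neg (by intro h; exact hpu h.1)]
      omega

theorem pvToFinset_union (vis : List (Int × Int)) (p : Int × Int) :
    (PySem.Set.union vis [p]).toFinset = insert p vis.toFinset := by
  ext a
  simp [List.mem_toFinset, PySem.Set.mem_union, or_comm]

-- visited | {pos} if visited else {pos}   (A's reassignment of `visited`)
def pvVisited (vis : List (Int × Int)) (p : Int × Int) : PySem.Set (Int × Int) :=
  if vis.isEmpty then PySem.Set.ofList [p] else PySem.Set.union vis [p]

-- both truthiness branches equal `visited | {pos}`
theorem pvVisited_eq (vis : List (Int × Int)) (p : Int × Int) :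
    pvVisited vis p = PySem.Set.union vis [p] := by
  unfold pvVisited
  split
  · rename_i h
    rw [List.isEmpty_iff.1 h]
    exact (PySem.Set.update_nil_left _).symm
  · rfl

-- the dict Python builds from the (key, value) pairs, keys re-associated to Int × Int
def pvDict (paths : List (Int × Int × List (Int × Int))) : PySem.Dict (Int × Int) (List (Int × Int)) :=
  PySem.Dict.ofList (paths.map (fun e => ((e.1, e.2.1), e.2.2)))

theorem pvMem_univ (pd : PySem.Dict (Int × Int) (List (Int × Int))) (pos q : Int × Int)
    (h : q ∈ (pd.get? pos).getD []) : q ∈ pvUnivF pd := by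
  cases hg : pd.get? pos with
  | none => rw [hg] at h; simp at h
  | some l =>
    rw [hg] at h
    have hl : l ∈ pd.values := by
      have := PySem.Dict.mem_items_of_get?_eq_some pd hg
      exact List.mem_map.2 ⟨(pos, l), this, rfl⟩
    exact List.mem_toFinset.2 (List.mem_flatten.2 ⟨l, hl, h⟩)

theorem pvStep_lt (pd : PySem.Dict (Int × Int) (List (Int × Int))) (pos q : Int × Int)
    (vis vis' : List (Int × Int)) (hvt : vis'.toFinset = insert pos vis.toFinset)
    (hq : q ∈ (pd.get? pos).getD []) (hnc : PySem.Set.contains vis' q = false) :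
    pvMuF pd q vis'.toFinset < pvMuF pd pos vis.toFinset := by
  have h1 : q ∈ pvUnivF pd := pvMem_univ pd pos q hq
  have h2 : q ∉ vis' := by
    intro hmem
    rw [(PySem.Set.contains_iff vis' q).2 hmem] at hnc
    simp at hnc
  have h3 : q ∉ insert pos vis.toFinset := by
    rw [← hvt]
    exact fun h => h2 (List.mem_toFinset.1 h)
  rw [hvt]
  exact pvMu_lt pd pos q vis.toFinset h1 h3

-- set.union(*ls) if ls else set()
def pvUnionAll (ls : List (PySem.Set (List (Int × Int)))) : PySem.Set (List (Int × Int)) :=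
  match ls with
  | [] => []
  | s :: rest => rest.foldl PySem.Set.union s

def pvGetA (pd : PySem.Dict (Int × Int) (List (Int × Int))) (m : List (List String))
    (pos : Int × Int) (visited : PySem.Set (Int × Int)) : PySem.Set (List (Int × Int)) :=
  if pvCell m pos = "c" then [[]]
  else
    let visited' := pvVisited visited pos
    -- [get_door_chains_in_paths(parent, paths, m, visited) for parent in paths[pos] if parent not in visited]
    let parent_door_chains :=
      (((pd.get? pos).getD []).filter (fun q => !(PySem.Set.contains visited' q))).attach.map
        (fun qh => pvGetA pd m qh.1 visited')
    let u := pvUnionAll parent_door_chains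
    if pvCell m pos = "?" then PySem.Set.ofList (u.map (fun dp => pos :: dp)) else u
termination_by pvMuF pd pos visited.toFinset
decreasing_by
  exact pvStep_lt pd pos qh.1 visited _ (by rw [pvVisited_eq]; exact pvToFinset_union visited pos)
    (List.mem_filter.1 qh.2).1 (by simpa using (List.mem_filter.1 qh.2).2)

-- None and the empty set are used identically by A (plain truthiness), so None is passed as []
def get_door_chains_in_paths (pos : Int × Int) (paths : List (Int × Int × List (Int × Int))) (m : List (List String)) (visited : Option (List (Int × Int))) : List (List (Int × Int)) :=
  pvGetA (pvDict paths) m pos (match visited with | some v => v | none => [])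

-- ===== PORT B =====
-- weight of a stack entry: branching bound ^ measure; the stack weight sum shrinks at every pop
def pvBnd (pd : PySem.Dict (Int × Int) (List (Int × Int))) : Nat :=
  pd.values.foldr (fun l n => max l.length n) 0 + 2
def pvWeight (pd : PySem.Dict (Int × Int) (List (Int × Int)))
    (e : (Int × Int) × List (Int × Int) × List (Int × Int)) : Nat :=
  pvBnd pd ^ pvMuF pd e.1 e.2.1.toFinset
def pvStackW (pd : PySem.Dict (Int × Int) (List (Int × Int)))
    (st : List ((Int × Int) × List (Int × Int) × List (Int × Int))) : Nat :=
  (st.map (pvWeight pd)).sum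

theorem pvBnd_pos (pd : PySem.Dict (Int × Int) (List (Int × Int))) : 0 < pvBnd pd := by
  unfold pvBnd; omega

theorem pvWeight_pos (pd : PySem.Dict (Int × Int) (List (Int × Int)))
    (e : (Int × Int) × List (Int × Int) × List (Int × Int)) : 0 < pvWeight pd e :=
  Nat.pow_pos (pvBnd_pos pd)

theorem pvStackW_tail_lt (pd : PySem.Dict (Int × Int) (List (Int × Int)))
    (e : (Int × Int) × List (Int × Int) × List (Int × Int))
    (rest : List ((Int × Int) × List (Int × Int) × List (Int × Int))) :
    pvStackW pd rest < pvStackW pd (e :: rest) := by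
  unfold pvStackW
  rw [List.map_cons, List.sum_cons]
  have := pvWeight_pos pd e
  omega

theorem pvFoldlPush {α β : Type} (g : α → β) : ∀ (xs : List α) (rest : List β),
    xs.foldl (fun st q => g q :: st) rest = (xs.map g).reverse ++ rest := by
  intro xs
  induction xs with
  | nil => intro rest; rfl
  | cons x xs ih => intro rest; simp [ih]

theorem pvFoldrMax_le (ls : List (List (Int × Int))) (l : List (Int × Int)) (h : l ∈ ls) :
    l.length ≤ ls.foldr (fun l n => max l.length n) 0 := by
  induction ls with
  | nil => cases h
  | cons a tl ih =>
    rcases List.mem_cons.1 h with h | h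
    · subst h; exact le_max_left _ _
    · exact le_trans (ih h) (le_max_right _ _)

theorem pvParents_len (pd : PySem.Dict (Int × Int) (List (Int × Int))) (p : Int × Int) :
    ((pd.get? p).getD []).length + 2 ≤ pvBnd pd := by
  cases hg : pd.get? p with
  | none => simp [pvBnd]
  | some l =>
    have hl : l ∈ pd.values :=
      List.mem_map.2 ⟨(p, l), PySem.Dict.mem_items_of_get?_eq_some pd hg, rfl⟩
    have := pvFoldrMax_le pd.values l hl
    unfold pvBnd
    simp only [Option.getD_some]
    omega

theorem pvStackW_push_lt (pd : PySem.Dict (Int × Int) (List (Int × Int)))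
    (p : Int × Int) (vis chain chain2 : List (Int × Int))
    (rest : List ((Int × Int) × List (Int × Int) × List (Int × Int))) :
    pvStackW pd ((((pd.get? p).getD []).reverse.filter
        (fun q => !(PySem.Set.contains (PySem.Set.union vis [p]) q))).foldl
        (fun st q => (q, PySem.Set.union vis [p], chain2) :: st) rest)
      < pvStackW pd ((p, vis, chain) :: rest) := by
  rw [pvFoldlPush (fun q => (q, PySem.Set.union vis [p], chain2))]
  unfold pvStackW
  rw [List.map_append, List.sum_append, List.map_cons, List.sum_cons, List.map_reverse, List.sum_reverse]
  have hsum : (((((pd.get? p).getD []).reverse.filter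
      (fun q => !(PySem.Set.contains (PySem.Set.union vis [p]) q))).map
        (fun q => (q, PySem.Set.union vis [p], chain2))).map (pvWeight pd)).sum
      < pvWeight pd (p, vis, chain) := by
    set l := ((pd.get? p).getD []).reverse.filter
      (fun q => !(PySem.Set.contains (PySem.Set.union vis [p]) q)) with hldef
    have hstep : ∀ q ∈ l, pvMuF pd q (PySem.Set.union vis [p]).toFinset < pvMuF pd p vis.toFinset := by
      intro q hq
      have h1 := List.mem_reverse.1 (List.mem_filter.1 hq).1
      have h2 : PySem.Set.contains (PySem.Set.union vis [p]) q = false := by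
        have := (List.mem_filter.1 hq).2; simpa using this
      exact pvStep_lt pd p q vis _ (pvToFinset_union vis p) h1 h2
    by_cases hl0 : l = []
    · rw [hl0]; simpa using pvWeight_pos pd (p, vis, chain)
    · obtain ⟨a, ha⟩ := List.exists_mem_of_ne_nil l hl0
      have hμp : 1 ≤ pvMuF pd p vis.toFinset := by
        have := hstep a ha
        omega
      have hbound : ∀ x ∈ (l.map (fun q => (q, PySem.Set.union vis [p], chain2))).map (pvWeight pd),
          x ≤ pvBnd pd ^ (pvMuF pd p vis.toFinset - 1) := by
        intro x hx
        rcases List.mem_map.1 hx with ⟨e, he, rfl⟩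
        rcases List.mem_map.1 he with ⟨q, hq, rfl⟩
        have := hstep q hq
        show pvBnd pd ^ pvMuF pd q (PySem.Set.union vis [p]).toFinset ≤ _
        exact Nat.pow_le_pow_right (pvBnd_pos pd) (by omega)
      have hsum' := List.sum_le_card_nsmul _ _ hbound
      have hlen : l.length ≤ ((pd.get? p).getD []).length := by
        rw [hldef]
        exact le_trans (List.length_filter_le _ _) (by rw [List.length_reverse])
      have hplen := pvParents_len pd p
      have hpow : pvBnd pd ^ pvMuF pd p vis.toFinset
          = pvBnd pd * pvBnd pd ^ (pvMuF pd p vis.toFinset - 1) := by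
        conv_lhs => rw [show pvMuF pd p vis.toFinset = (pvMuF pd p vis.toFinset - 1) + 1 by omega]
        rw [pow_succ]
        ring
      have hX : 0 < pvBnd pd ^ (pvMuF pd p vis.toFinset - 1) := Nat.pow_pos (pvBnd_pos pd)
      have hlenmap : ((l.map (fun q => (q, PySem.Set.union vis [p], chain2))).map (pvWeight pd)).length = l.length := by
        simp
      rw [hlenmap, smul_eq_mul] at hsum'
      show _ < pvBnd pd ^ pvMuF pd p vis.toFinset
      calc ((l.map (fun q => (q, PySem.Set.union vis [p], chain2))).map (pvWeight pd)).sum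
          ≤ l.length * pvBnd pd ^ (pvMuF pd p vis.toFinset - 1) := hsum'
        _ < pvBnd pd * pvBnd pd ^ (pvMuF pd p vis.toFinset - 1) := by
            apply Nat.mul_lt_mul_of_lt_of_le _ (le_refl _) hX
            omega
        _ = pvBnd pd ^ pvMuF pd p vis.toFinset := hpow.symm
  omega

-- the while-loop: pop (p, vis, chain); on 'c' add chain to the result, else push the
-- not-yet-visited parents (reversed, so they are popped in original order)
def pvLoopB (pd : PySem.Dict (Int × Int) (List (Int × Int))) (m : List (List String))
    (stack : List ((Int × Int) × List (Int × Int) × List (Int × Int)))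
    (res : PySem.Set (List (Int × Int))) : PySem.Set (List (Int × Int)) :=
  match stack with
  | [] => res
  | (p, vis, chain) :: rest =>
    if pvCell m p = "c" then pvLoopB pd m rest (PySem.Set.add res chain)
    else
      pvLoopB pd m
        ((((pd.get? p).getD []).reverse.filter
            (fun q => !(PySem.Set.contains (PySem.Set.union vis [p]) q))).foldl
          (fun st q => (q, PySem.Set.union vis [p],
              (if pvCell m p = "?" then chain ++ [p] else chain)) :: st) rest)
        res
termination_by pvStackW pd stack
decreasing_by
  · exact pvStackW_tail_lt pd _ rest
  · exact pvStackW_push_lt pd p vis chain _ rest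

-- base = frozenset(visited) if visited else frozenset(); stack = [(pos, base, ())]
def get_door_chains_in_paths_alt (pos : Int × Int) (paths : List (Int × Int × List (Int × Int))) (m : List (List String)) (visited : Option (List (Int × Int))) : List (List (Int × Int)) :=
  pvLoopB (pvDict paths) m [(pos, (match visited with | some v => v | none => []), [])] []

-- ===== PRECONDITION & SPEC =====
def pvGoodPos (paths : List (Int × Int × List (Int × Int))) (m : List (List String)) (p : Int × Int) : Bool :=
  (pvCellOpt m p).isSome && (pvCell m p == "c" || ((pvDict paths).get? p).isSome)

-- Pre_ excludes the inputs on which A raises: an out-of-range cell index (IndexError) or a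
-- non-'c' cell missing from paths (KeyError).  When the start cell is not 'c' it requires this
-- of EVERY position listed as a parent value in paths, which over-approximates the positions A
-- actually reaches, so it also excludes some inputs on which A returns (a bad but unreachable
-- or visited-blocked parent; see cites).
def Pre_get_door_chains_in_paths (pos : Int × Int) (paths : List (Int × Int × List (Int × Int))) (m : List (List String)) (visited : Option (List (Int × Int))) : Prop :=
  pvGoodPos paths m pos ∧
    (pvCell m pos ≠ "c" → ∀ q ∈ (pvDict paths).values.flatten, pvGoodPos paths m q)
instance (pos : Int × Int) (paths : List (Int × Int × List (Int × Int))) (m : List (List String)) (visited : Option (List (Int × Int))) : Decidable (Pre_get_door_chains_in_paths pos paths m visited) := by unfold Pre_get_door_chains_in_paths; infer_instance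

def pvWitness_get_door_chains_in_paths : (Int × Int) × (List (Int × Int × List (Int × Int))) × List (List String) × (Option (List (Int × Int))) :=
  ((0, 0), [], [["c"]], none)

def Spec_get_door_chains_in_paths (pos : Int × Int) (paths : List (Int × Int × List (Int × Int))) (m : List (List String)) (visited : Option (List (Int × Int))) (out : List (List (Int × Int))) : Prop := out = get_door_chains_in_paths_alt pos paths m visited
instance (pos : Int × Int) (paths : List (Int × Int × List (Int × Int))) (m : List (List String)) (visited : Option (List (Int × Int))) (out : List (List (Int × Int))) : Decidable (Spec_get_door_chains_in_paths pos paths m visited out) := by unfold Spec_get_door_chains_in_paths; infer_instance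

-- ===== CLAIM (what is proved, stated in full; the proofs are below) =====
def Claim_equal_get_door_chains_in_paths : Prop := ∀ (pos : Int × Int) (paths : List (Int × Int × List (Int × Int))) (m : List (List String)) (visited : Option (List (Int × Int))), Dom_get_door_chains_in_paths pos paths m visited → Pre_get_door_chains_in_paths pos paths m visited → Spec_get_door_chains_in_paths pos paths m visited (get_door_chains_in_paths pos paths m visited)

-- ===== LEMMAS AND PROOFS =====

-- the common characterisation: the list of door chains, one per DFS leaf, in DFS order,
-- with the partial chain threaded downward (B's shape); A's value is its dedup (ofList)
def pvChains (pd : PySem.Dict (Int × Int) (List (Int × Int))) (m : List (List String))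
    (pos : Int × Int) (vis : List (Int × Int)) (chain : List (Int × Int)) : List (List (Int × Int)) :=
  if pvCell m pos = "c" then [chain]
  else
    (((pd.get? pos).getD []).filter (fun q => !(PySem.Set.contains (PySem.Set.union vis [pos]) q))).attach.flatMap
      (fun qh => pvChains pd m qh.1 (PySem.Set.union vis [pos])
        (if pvCell m pos = "?" then chain ++ [pos] else chain))
termination_by pvMuF pd pos vis.toFinset
decreasing_by
  exact pvStep_lt pd pos qh.1 vis _ (pvToFinset_union vis pos)
    (List.mem_filter.1 qh.2).1 (by simpa using (List.mem_filter.1 qh.2).2)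

theorem pvChains_factor (pd : PySem.Dict (Int × Int) (List (Int × Int))) (m : List (List String)) :
    ∀ (n : Nat) (pos : Int × Int) (vis chain : List (Int × Int)),
      pvMuF pd pos vis.toFinset < n →
      pvChains pd m pos vis chain = (pvChains pd m pos vis []).map (chain ++ ·) := by
  intro n
  induction n with
  | zero => intro pos vis chain h; exact absurd h (Nat.not_lt_zero _)
  | succ n ih =>
    intro pos vis chain h
    rw [pvChains, pvChains]
    by_cases hc : pvCell m pos = "c"
    · simp [hc]
    · simp only [if_neg hc, List.map_flatMap]
      congr 1
      funext qh
      have hmem := qh.2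
      have hmu : pvMuF pd qh.1 (PySem.Set.union vis [pos]).toFinset < n := by
        have := pvStep_lt pd pos qh.1 vis _ (pvToFinset_union vis pos)
          (List.mem_filter.1 hmem).1 (by simpa using (List.mem_filter.1 hmem).2)
        omega
      rw [ih qh.1 _ (if pvCell m pos = "?" then chain ++ [pos] else chain) hmu,
          ih qh.1 _ (if pvCell m pos = "?" then [] ++ [pos] else []) hmu,
          List.map_map]
      by_cases hq : pvCell m pos = "?" <;> simp [hq, Function.comp_def]

-- first-occurrence dedup commutes with deduplicating the argument first
theorem pvOfList_map (f : List (Int × Int) → List (Int × Int)) (l : List (List (Int × Int))) :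
    PySem.Set.ofList ((PySem.Set.ofList l).map f) = PySem.Set.ofList (l.map f) := by
  induction l using List.reverseRecOn with
  | nil => rfl
  | append_singleton l x ih =>
    rw [PySem.Set.ofList_append_singleton, List.map_append, List.map_singleton,
      PySem.Set.ofList_append_singleton]
    by_cases hx : x ∈ PySem.Set.ofList l
    · have hc : PySem.Set.contains (PySem.Set.ofList l) x = true :=
        (PySem.Set.contains_iff _ _).2 hx
      have hadd : (PySem.Set.ofList l).add x = PySem.Set.ofList l := by
        show (if (PySem.Set.ofList l).contains x then PySem.Set.ofList l
            else PySem.Set.ofList l ++ [x]) = PySem.Set.ofList l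
        rw [hc]; rfl
      rw [hadd, ih]
      have hfx : f x ∈ PySem.Set.ofList (l.map f) :=
        (PySem.Set.mem_ofList _ _).2 (List.mem_map.2 ⟨x, (PySem.Set.mem_ofList _ _).1 hx, rfl⟩)
      have hc2 : PySem.Set.contains (PySem.Set.ofList (l.map f)) (f x) = true :=
        (PySem.Set.contains_iff _ _).2 hfx
      show _ = (if (PySem.Set.ofList (l.map f)).contains (f x) then PySem.Set.ofList (l.map f)
          else PySem.Set.ofList (l.map f) ++ [f x])
      rw [hc2, if_pos rfl]
    · have hc : PySem.Set.contains (PySem.Set.ofList l) x = false := by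
        rcases h : PySem.Set.contains (PySem.Set.ofList l) x
        · rfl
        · exact absurd ((PySem.Set.contains_iff _ _).1 h) hx
      have hadd : (PySem.Set.ofList l).add x = PySem.Set.ofList l ++ [x] := by
        show (if (PySem.Set.ofList l).contains x then PySem.Set.ofList l
            else PySem.Set.ofList l ++ [x]) = _
        rw [hc]; rfl
      rw [hadd, List.map_append, List.map_singleton, PySem.Set.ofList_append_singleton, ih]

theorem pvUnion_ofList (a b : List (List (Int × Int))) :
    PySem.Set.union (PySem.Set.ofList a) (PySem.Set.ofList b) = PySem.Set.ofList (a ++ b) := by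
  show PySem.Set.update (PySem.Set.ofList a) (PySem.Set.ofList b) = _
  rw [PySem.Set.ofList_append, PySem.Set.update_eq_append_filter, PySem.Set.update_eq_append_filter,
    PySem.Set.ofList_ofList]

theorem pvFoldUnion (ls : List (List (List (Int × Int)))) :
    pvUnionAll (ls.map PySem.Set.ofList) = PySem.Set.ofList ls.flatten := by
  cases ls with
  | nil => rfl
  | cons a tl =>
    show (tl.map PySem.Set.ofList).foldl PySem.Set.union (PySem.Set.ofList a) = PySem.Set.ofList ((a :: tl).flatten)
    induction tl generalizing a with
    | nil => simp
    | cons b tl ih =>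
      simp only [List.map_cons, List.foldl_cons, pvUnion_ofList]
      rw [ih (a ++ b)]
      simp

theorem pvA_char (pd : PySem.Dict (Int × Int) (List (Int × Int))) (m : List (List String)) :
    ∀ (n : Nat) (pos : Int × Int) (vis : List (Int × Int)),
      pvMuF pd pos vis.toFinset < n →
      pvGetA pd m pos vis = PySem.Set.ofList (pvChains pd m pos vis []) := by
  intro n
  induction n with
  | zero => intro pos vis h; exact absurd h (Nat.not_lt_zero _)
  | succ n ih =>
    intro pos vis h
    rw [pvGetA, pvChains]
    by_cases hc : pvCell m pos = "c"
    · simp only [if_pos hc]; rfl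
    · simp only [if_neg hc, List.map_subtype, List.flatMap_subtype, List.unattach_attach,
        pvVisited_eq]
      have hstep : ∀ q ∈ ((pd.get? pos).getD []).filter
          (fun x => !(PySem.Set.contains (PySem.Set.union vis [pos]) x)),
          pvMuF pd q (PySem.Set.union vis [pos]).toFinset < n := by
        intro q hq
        have := pvStep_lt pd pos q vis _ (pvToFinset_union vis pos)
          (List.mem_filter.1 hq).1 (by simpa using (List.mem_filter.1 hq).2)
        omega
      have hL : (((pd.get? pos).getD []).filter
            (fun x => !(PySem.Set.contains (PySem.Set.union vis [pos]) x))).map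
              (fun q => pvGetA pd m q (PySem.Set.union vis [pos]))
          = ((((pd.get? pos).getD []).filter
            (fun x => !(PySem.Set.contains (PySem.Set.union vis [pos]) x))).map
              (fun q => pvChains pd m q (PySem.Set.union vis [pos]) [])).map PySem.Set.ofList := by
        rw [List.map_map]
        exact List.map_congr_left (fun q hq => ih q _ (hstep q hq))
      rw [hL, pvFoldUnion, ← List.flatMap_def]
      by_cases hq : pvCell m pos = "?"
      · simp only [if_pos hq, pvOfList_map]
        congr 1
        rw [List.map_flatMap, List.flatMap_def, List.flatMap_def]
        congr 1
        apply List.map_congr_left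
        intro q hqm
        rw [pvChains_factor pd m n q _ ([] ++ [pos]) (hstep q hqm)]
        rfl
      · simp only [if_neg hq]

theorem pvB_step (pd : PySem.Dict (Int × Int) (List (Int × Int))) (m : List (List String)) :
    ∀ (n : Nat) (p : Int × Int) (vis chain : List (Int × Int))
      (rest : List ((Int × Int) × List (Int × Int) × List (Int × Int)))
      (res : PySem.Set (List (Int × Int))),
      pvMuF pd p vis.toFinset < n →
      pvLoopB pd m ((p, vis, chain) :: rest) res
        = pvLoopB pd m rest (PySem.Set.update res (pvChains pd m p vis chain)) := by
  intro n
  induction n with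
  | zero => intro p vis chain rest res h; exact absurd h (Nat.not_lt_zero _)
  | succ n ih =>
    intro p vis chain rest res h
    rw [pvLoopB, pvChains]
    by_cases hc : pvCell m p = "c"
    · simp only [if_pos hc]
      rw [PySem.Set.update_cons, PySem.Set.update_nil]
    · simp only [if_neg hc, List.flatMap_subtype, List.unattach_attach]
      rw [pvFoldlPush (fun q => (q, PySem.Set.union vis [p],
            (if pvCell m p = "?" then chain ++ [p] else chain))),
          List.filter_reverse, List.map_reverse, List.reverse_reverse]
      have hstep : ∀ q ∈ ((pd.get? p).getD []).filter
          (fun x => !(PySem.Set.contains (PySem.Set.union vis [p]) x)),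
          pvMuF pd q (PySem.Set.union vis [p]).toFinset < n := by
        intro q hq
        have := pvStep_lt pd p q vis _ (pvToFinset_union vis p)
          (List.mem_filter.1 hq).1 (by simpa using (List.mem_filter.1 hq).2)
        omega
      have haux : ∀ (l : List (Int × Int)),
          (∀ q ∈ l, pvMuF pd q (PySem.Set.union vis [p]).toFinset < n) →
          ∀ (rest : List ((Int × Int) × List (Int × Int) × List (Int × Int)))
            (res : PySem.Set (List (Int × Int))),
          pvLoopB pd m ((l.map (fun q => (q, PySem.Set.union vis [p],
              (if pvCell m p = "?" then chain ++ [p] else chain)))) ++ rest) res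
            = pvLoopB pd m rest (PySem.Set.update res (l.flatMap
                (fun q => pvChains pd m q (PySem.Set.union vis [p])
                  (if pvCell m p = "?" then chain ++ [p] else chain)))) := by
        intro l
        induction l with
        | nil => intro _ rest res; simp [PySem.Set.update_nil]
        | cons a as ihl =>
          intro hall rest res
          simp only [List.map_cons, List.cons_append, List.flatMap_cons]
          rw [ih a _ _ _ res (hall a List.mem_cons_self)]
          rw [ihl (fun q hq => hall q (List.mem_cons_of_mem a hq)) rest _]
          rw [PySem.Set.update_append]
      exact haux _ hstep rest res

-- ===== VERDICT (by name: the statement is the Claim_ definition above) =====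
theorem get_door_chains_in_paths_spec : Claim_equal_get_door_chains_in_paths := by
  intro pos paths m visited _ _
  show _ = get_door_chains_in_paths_alt pos paths m visited
  unfold get_door_chains_in_paths get_door_chains_in_paths_alt
  rw [pvA_char (pvDict paths) m (pvMuF (pvDict paths) pos
        (match visited with | some v => v | none => []).toFinset + 1) pos _ (Nat.lt_succ_self _),
      pvB_step (pvDict paths) m (pvMuF (pvDict paths) pos
        (match visited with | some v => v | none => []).toFinset + 1) pos _ [] [] [] (Nat.lt_succ_self _),
      pvLoopB, PySem.Set.update_nil_left]
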